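-- pv_equiv track=rewrite | github.com/ROCm/TheRock | mirage/tools/architecture_import/gfx1250/import_gfx1250_architecture.py | normalize_llvm_symbol
-- ===== SOURCE A (Python) =====
-- def normalize_llvm_symbol(symbol: str) -> str:
--     normalized = symbol
--     for suffix in (
--         "_gfx1250_fake16_e64",
--         "_gfx1250_t16_e64",
--         "_gfx1250_fake16",
--         "_gfx1250_t16",
--         "_gfx1250_e64",
--         "_gfx1250",
--         "_fake16_e64",
--         "_t16_e64",
--         "_fake16",
--         "_t16",
--         "_e64",
--     ):
--         if normalized.endswith(suffix):
--             normalized = normalized[: -len(suffix)]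
--             break
--     return normalized
-- ===== SOURCE B (Python) =====
-- def normalize_llvm_symbol(symbol: str) -> str:
--     result = symbol
--     if result.endswith("_e64"):
--         result = result[:-4]
--     if result.endswith("_fake16"):
--         result = result[:-7]
--     elif result.endswith("_t16"):
--         result = result[:-4]
--     if result.endswith("_gfx1250"):
--         result = result[:-8]
--     return result
-- ===== Notes on version B (the rewrite author's own statement) =====
-- stated objective: simpler
-- what changed: A scans a hard-coded list of the eleven precomposed suffix combinations and strips the first match; B peels the three independent components in order (_e64, then _fake16 or _t16, then _gfx1250), each at most once, so the combination list disappears.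
import Mathlib
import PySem

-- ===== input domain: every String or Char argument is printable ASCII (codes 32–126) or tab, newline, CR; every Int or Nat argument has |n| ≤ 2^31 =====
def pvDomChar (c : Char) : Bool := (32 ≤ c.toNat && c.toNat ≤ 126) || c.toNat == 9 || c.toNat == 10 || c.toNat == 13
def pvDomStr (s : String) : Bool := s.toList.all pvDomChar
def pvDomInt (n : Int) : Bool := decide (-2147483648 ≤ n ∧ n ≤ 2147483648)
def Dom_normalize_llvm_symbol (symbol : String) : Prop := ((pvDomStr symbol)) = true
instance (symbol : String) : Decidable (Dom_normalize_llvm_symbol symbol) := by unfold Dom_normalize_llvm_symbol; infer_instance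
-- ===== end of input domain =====

-- B replaces A's single scan over eleven precomposed suffix combos by peeling the three
-- components (_e64, then _fake16/_t16, then _gfx1250) one at a time; objective: simpler.

-- ===== PORT A =====
-- the for-loop with break: try each suffix in order, strip the first that matches
def stripFirstA : List String → String → String
  | [], s => s
  | suf :: rest, s =>
    if PySem.Str.endswith s suf then
      PySem.Str.slice s none (some (-(PySem.Str.len suf : Int)))
    else stripFirstA rest s

def normalize_llvm_symbol (symbol : String) : String :=
  stripFirstA
    ["_gfx1250_fake16_e64", "_gfx1250_t16_e64", "_gfx1250_fake16", "_gfx1250_t16",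
     "_gfx1250_e64", "_gfx1250", "_fake16_e64", "_t16_e64", "_fake16", "_t16", "_e64"]
    symbol

-- ===== PORT B =====
def normalize_llvm_symbol_alt (symbol : String) : String :=
  let r0 := symbol
  let r1 := if PySem.Str.endswith r0 "_e64" then PySem.Str.slice r0 none (some (-4)) else r0
  let r2 :=
    if PySem.Str.endswith r1 "_fake16" then PySem.Str.slice r1 none (some (-7))
    else if PySem.Str.endswith r1 "_t16" then PySem.Str.slice r1 none (some (-4)) else r1
  if PySem.Str.endswith r2 "_gfx1250" then PySem.Str.slice r2 none (some (-8)) else r2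

-- ===== PRECONDITION & SPEC =====
def Spec_normalize_llvm_symbol (symbol : String) (out : String) : Prop := out = normalize_llvm_symbol_alt symbol
instance (symbol : String) (out : String) : Decidable (Spec_normalize_llvm_symbol symbol out) := by unfold Spec_normalize_llvm_symbol; infer_instance

-- ===== CLAIM (what is proved, stated in full; the proofs are below) =====
def Claim_equal_normalize_llvm_symbol : Prop := ∀ (symbol : String), Dom_normalize_llvm_symbol symbol → Spec_normalize_llvm_symbol symbol (normalize_llvm_symbol symbol)

-- ===== LEMMAS AND PROOFS =====

-- list-level mirror of A's loop
def firstStripL : List (List Char) → List Char → List Char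
  | [], l => l
  | c :: rest, l => if c <:+ l then l.take (l.length - c.length) else firstStripL rest l

def stripSfx (suf l : List Char) : List Char :=
  if suf <:+ l then l.take (l.length - suf.length) else l

def eL : List Char := ['_','e','6','4']
def fL : List Char := ['_','f','a','k','e','1','6']
def tL : List Char := ['_','t','1','6']
def gL : List Char := ['_','g','f','x','1','2','5','0']

def midL (l : List Char) : List Char :=
  if fL <:+ l then l.take (l.length - fL.length) else stripSfx tL l

-- list-level mirror of B's staged peel
def altL (l : List Char) : List Char := stripSfx gL (midL (stripSfx eL l))

lemma endswith_iff' (s p : String) : PySem.Str.endswith s p = true ↔ p.toList <:+ s.toList := by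
  simp [PySem.Str.endswith_eq, PySem.Chars.endswith_iff]

lemma slice_neg_toList (s : String) (k : Nat) (hk : 0 < k) :
    (PySem.Str.slice s none (some (-(k:Int)))).toList = s.toList.take (s.toList.length - k) := by
  rw [PySem.Str.toList_slice, PySem.Chars.slice_eq_listSlice, PySem.List.slice_to_neg_natCast _ _ hk]

lemma suffix_of_suffix_le {a b l : List Char} (h : a <:+ l) (h2 : b <:+ l)
    (hl : a.length ≤ b.length) : a <:+ b := by
  rcases List.suffix_or_suffix_of_suffix h h2 with h3 | h3
  · exact h3
  · exact (h3.eq_of_length (le_antisymm h3.length_le hl)) ▸ List.suffix_rfl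

lemma not_suffix_excl {a b l : List Char} (ha : a <:+ l) (hlen : a.length ≤ b.length)
    (hnab : ¬ a <:+ b) : ¬ b <:+ l := fun hb => hnab (suffix_of_suffix_le ha hb hlen)

lemma append_suffix_iff (a b l : List Char) :
    (a ++ b) <:+ l ↔ b <:+ l ∧ a <:+ l.take (l.length - b.length) := by
  constructor
  · rintro ⟨t, rfl⟩
    refine ⟨⟨t ++ a, by simp⟩, ?_⟩
    have : (t ++ (a ++ b)).length - b.length = (t ++ a).length := by simp; omega
    rw [this, ← List.append_assoc, List.take_left]
    exact ⟨t, rfl⟩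
  · rintro ⟨⟨u, rfl⟩, ha⟩
    have hu : (u ++ b).length - b.length = u.length := by simp
    rw [hu, List.take_left] at ha
    rcases ha with ⟨v, rfl⟩
    exact ⟨v, by simp⟩

-- length of a take-stripped suffix
lemma len_strip {l : List Char} {a : Nat} (_ha : a ≤ l.length) :
    (l.take (l.length - a)).length = l.length - a := by
  simp [List.length_take]

-- composing two suffix strips
lemma strip2 (l : List Char) (a b : Nat) (ha : a ≤ l.length)
    (hb : b ≤ (l.take (l.length - a)).length) :
    List.take ((l.take (l.length - a)).length - b) (l.take (l.length - a))
      = l.take (l.length - (b + a)) := by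
  rw [List.take_take]
  rw [len_strip ha] at hb ⊢
  congr 1
  omega

lemma stripFirstA_toList (L : List String) (s : String) (h : ∀ p ∈ L, p.toList ≠ []) :
    (stripFirstA L s).toList = firstStripL (L.map String.toList) s.toList := by
  induction L with
  | nil => rfl
  | cons p rest ih =>
    simp only [stripFirstA, firstStripL, List.map]
    by_cases he : p.toList <:+ s.toList
    · rw [if_pos ((endswith_iff' s p).mpr he), if_pos he]
      have hlen : 0 < p.toList.length := List.length_pos_of_ne_nil (h p (by simp))
      have hcast : (PySem.Str.len p : Int) = ((p.toList.length : Nat) : Int) := by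
        simp [PySem.Str.len_eq]
      rw [hcast, slice_neg_toList s _ hlen]
    · rw [if_neg (fun hb => he ((endswith_iff' s p).mp hb)), if_neg he]
      exact ih (fun q hq => h q (by simp [hq]))


-- single-strip version for the no-_e64 branch
lemma strip2' (l : List Char) (a b : Nat) (ha : a ≤ l.length)
    (hb : b ≤ (l.take (l.length - a)).length) :
    List.take ((l.take (l.length - a)).length - b) (l.take (l.length - a))
      = l.take (l.length - (b + a)) := strip2 l a b ha hb

-- the eleven combos, decomposed over the three components
lemma key (l : List Char) :
    firstStripL [(gL ++ fL) ++ eL, (gL ++ tL) ++ eL, gL ++ fL, gL ++ tL, gL ++ eL, gL,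
                 fL ++ eL, tL ++ eL, fL, tL, eL] l = altL l := by
  have hneg : ∀ (c : List Char) (rest : List (List Char)), ¬ c <:+ l →
      firstStripL (c :: rest) l = firstStripL rest l := by
    intro c rest h; simp [firstStripL, h]
  have hpos : ∀ (c : List Char) (rest : List (List Char)), c <:+ l →
      firstStripL (c :: rest) l = l.take (l.length - c.length) := by
    intro c rest h; simp [firstStripL, h]
  have d1 : (gL ++ fL) ++ eL <:+ l ↔ eL <:+ l ∧ fL <:+ List.take (l.length - eL.length) l ∧
      gL <:+ List.take ((List.take (l.length - eL.length) l).length - fL.length)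
        (List.take (l.length - eL.length) l) := by
    rw [append_suffix_iff, append_suffix_iff]
  have d2 : (gL ++ tL) ++ eL <:+ l ↔ eL <:+ l ∧ tL <:+ List.take (l.length - eL.length) l ∧
      gL <:+ List.take ((List.take (l.length - eL.length) l).length - tL.length)
        (List.take (l.length - eL.length) l) := by
    rw [append_suffix_iff, append_suffix_iff]
  have d3 : gL ++ fL <:+ l ↔ fL <:+ l ∧ gL <:+ List.take (l.length - fL.length) l :=
    append_suffix_iff gL fL l
  have d4 : gL ++ tL <:+ l ↔ tL <:+ l ∧ gL <:+ List.take (l.length - tL.length) l :=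
    append_suffix_iff gL tL l
  have d5 : gL ++ eL <:+ l ↔ eL <:+ l ∧ gL <:+ List.take (l.length - eL.length) l :=
    append_suffix_iff gL eL l
  have d7 : fL ++ eL <:+ l ↔ eL <:+ l ∧ fL <:+ List.take (l.length - eL.length) l :=
    append_suffix_iff fL eL l
  have d8 : tL ++ eL <:+ l ↔ eL <:+ l ∧ tL <:+ List.take (l.length - eL.length) l :=
    append_suffix_iff tL eL l
  by_cases hE : eL <:+ l
  · have hEl : eL.length ≤ l.length := hE.length_le
    have e1 : (List.take (l.length - eL.length) l).length = l.length - eL.length :=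
      len_strip (by omega)
    -- combos without a trailing _e64 cannot match when _e64 does
    have n3 : ¬ gL ++ fL <:+ l := not_suffix_excl hE (by decide) (by decide)
    have n4 : ¬ gL ++ tL <:+ l := not_suffix_excl hE (by decide) (by decide)
    have n6 : ¬ gL <:+ l := not_suffix_excl hE (by decide) (by decide)
    have n9 : ¬ fL <:+ l := not_suffix_excl hE (by decide) (by decide)
    have n10 : ¬ tL <:+ l := not_suffix_excl hE (by decide) (by decide)
    by_cases hF : fL <:+ List.take (l.length - eL.length) l
    · have hFl : fL.length ≤ (List.take (l.length - eL.length) l).length := hF.length_le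
      have e2 : (List.take ((List.take (l.length - eL.length) l).length - fL.length)
          (List.take (l.length - eL.length) l)).length
          = (List.take (l.length - eL.length) l).length - fL.length :=
        len_strip (by omega)
      have nT : ¬ tL <:+ List.take (l.length - eL.length) l := fun h =>
        absurd (suffix_of_suffix_le h hF (by decide)) (by decide)
      have nG1 : ¬ gL <:+ List.take (l.length - eL.length) l :=
        not_suffix_excl hF (by decide) (by decide)
      by_cases hG : gL <:+ List.take ((List.take (l.length - eL.length) l).length - fL.length)
          (List.take (l.length - eL.length) l)
      · have hGl := hG.length_le
        rw [hpos _ _ (d1.mpr ⟨hE, hF, hG⟩)]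
        unfold altL midL stripSfx
        rw [if_pos hE, if_pos hF, if_pos hG,
            strip2 l eL.length fL.length (by omega) (by omega),
            strip2 l (fL.length + eL.length) gL.length (by simp [eL, fL] at *; omega)
              (by rw [len_strip (by simp [eL, fL] at *; omega)]
                  simp [eL, fL] at *; omega)]
        congr 1
      · rw [hneg _ _ (fun h => hG (d1.mp h).2.2), hneg _ _ (fun h => nT (d2.mp h).2.1),
            hneg _ _ n3, hneg _ _ n4, hneg _ _ (fun h => nG1 (d5.mp h).2), hneg _ _ n6,
            hpos _ _ (d7.mpr ⟨hE, hF⟩)]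
        unfold altL midL stripSfx
        rw [if_pos hE, if_pos hF, if_neg hG, strip2 l eL.length fL.length (by omega) (by omega)]
        congr 1
    · by_cases hT : tL <:+ List.take (l.length - eL.length) l
      · have hTl : tL.length ≤ (List.take (l.length - eL.length) l).length := hT.length_le
        have nG1 : ¬ gL <:+ List.take (l.length - eL.length) l :=
          not_suffix_excl hT (by decide) (by decide)
        by_cases hG : gL <:+ List.take ((List.take (l.length - eL.length) l).length - tL.length)
            (List.take (l.length - eL.length) l)
        · have hGl := hG.length_le
          have e2 : (List.take ((List.take (l.length - eL.length) l).length - tL.length)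
              (List.take (l.length - eL.length) l)).length
              = (List.take (l.length - eL.length) l).length - tL.length :=
            len_strip (by omega)
          rw [hneg _ _ (fun h => hF (d1.mp h).2.1), hpos _ _ (d2.mpr ⟨hE, hT, hG⟩)]
          unfold altL midL stripSfx
          rw [if_pos hE, if_neg hF, if_pos hT, if_pos hG,
              strip2 l eL.length tL.length (by omega) (by omega),
              strip2 l (tL.length + eL.length) gL.length (by simp [eL, tL] at *; omega)
                (by rw [len_strip (by simp [eL, tL] at *; omega)]
                    simp [eL, tL] at *; omega)]
          congr 1
        · rw [hneg _ _ (fun h => hF (d1.mp h).2.1), hneg _ _ (fun h => hG (d2.mp h).2.2),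
              hneg _ _ n3, hneg _ _ n4, hneg _ _ (fun h => nG1 (d5.mp h).2), hneg _ _ n6,
              hneg _ _ (fun h => hF (d7.mp h).2), hpos _ _ (d8.mpr ⟨hE, hT⟩)]
          unfold altL midL stripSfx
          rw [if_pos hE, if_neg hF, if_pos hT, if_neg hG,
              strip2 l eL.length tL.length (by omega) (by omega)]
          congr 1
      · by_cases hG : gL <:+ List.take (l.length - eL.length) l
        · have hGl := hG.length_le
          rw [hneg _ _ (fun h => hF (d1.mp h).2.1), hneg _ _ (fun h => hT (d2.mp h).2.1),
              hneg _ _ n3, hneg _ _ n4, hpos _ _ (d5.mpr ⟨hE, hG⟩)]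
          unfold altL midL stripSfx
          rw [if_pos hE, if_neg hF, if_neg hT, if_pos hG,
              strip2 l eL.length gL.length (by omega) (by omega)]
          congr 1
        · rw [hneg _ _ (fun h => hF (d1.mp h).2.1), hneg _ _ (fun h => hT (d2.mp h).2.1),
              hneg _ _ n3, hneg _ _ n4, hneg _ _ (fun h => hG (d5.mp h).2), hneg _ _ n6,
              hneg _ _ (fun h => hF (d7.mp h).2), hneg _ _ (fun h => hT (d8.mp h).2),
              hneg _ _ n9, hneg _ _ n10, hpos _ _ hE]
          unfold altL midL stripSfx
          rw [if_pos hE, if_neg hF, if_neg hT, if_neg hG]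
  · -- no _e64: the e64-ending combos die; the rest is the middle/gfx analysis on l itself
    have nE : ∀ {c : List Char}, (c ++ eL <:+ l) → False := fun h =>
      hE ((append_suffix_iff _ eL l).mp h).1
    by_cases hF : fL <:+ l
    · have hFl : fL.length ≤ l.length := hF.length_le
      have nT : ¬ tL <:+ l := fun h =>
        absurd (suffix_of_suffix_le h hF (by decide)) (by decide)
      have nG1 : ¬ gL <:+ l := not_suffix_excl hF (by decide) (by decide)
      by_cases hG : gL <:+ List.take (l.length - fL.length) l
      · rw [hneg _ _ nE, hneg _ _ nE, hpos _ _ (d3.mpr ⟨hF, hG⟩)]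
        unfold altL midL stripSfx
        rw [if_neg hE, if_pos hF, if_pos hG,
            strip2' l fL.length gL.length (by omega) hG.length_le]
        congr 1
      · rw [hneg _ _ nE, hneg _ _ nE, hneg _ _ (fun h => hG (d3.mp h).2),
            hneg _ _ (fun h => nT (d4.mp h).1), hneg _ _ nE, hneg _ _ nG1,
            hneg _ _ nE, hneg _ _ nE, hpos _ _ hF]
        unfold altL midL stripSfx
        rw [if_neg hE, if_pos hF, if_neg hG]
    · by_cases hT : tL <:+ l
      · have hTl : tL.length ≤ l.length := hT.length_le
        have nG1 : ¬ gL <:+ l := not_suffix_excl hT (by decide) (by decide)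
        by_cases hG : gL <:+ List.take (l.length - tL.length) l
        · rw [hneg _ _ nE, hneg _ _ nE, hneg _ _ (fun h => hF (d3.mp h).1),
              hpos _ _ (d4.mpr ⟨hT, hG⟩)]
          unfold altL midL stripSfx
          rw [if_neg hE, if_neg hF, if_pos hT, if_pos hG,
              strip2' l tL.length gL.length (by omega) hG.length_le]
          congr 1
        · rw [hneg _ _ nE, hneg _ _ nE, hneg _ _ (fun h => hF (d3.mp h).1),
              hneg _ _ (fun h => hG (d4.mp h).2), hneg _ _ nE, hneg _ _ nG1,
              hneg _ _ nE, hneg _ _ nE, hneg _ _ hF, hpos _ _ hT]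
          unfold altL midL stripSfx
          rw [if_neg hE, if_neg hF, if_pos hT, if_neg hG]
      · by_cases hG : gL <:+ l
        · rw [hneg _ _ nE, hneg _ _ nE, hneg _ _ (fun h => hF (d3.mp h).1),
              hneg _ _ (fun h => hT (d4.mp h).1), hneg _ _ nE, hpos _ _ hG]
          unfold altL midL stripSfx
          rw [if_neg hE, if_neg hF, if_neg hT, if_pos hG]
        · rw [hneg _ _ nE, hneg _ _ nE, hneg _ _ (fun h => hF (d3.mp h).1),
              hneg _ _ (fun h => hT (d4.mp h).1), hneg _ _ nE, hneg _ _ hG,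
              hneg _ _ nE, hneg _ _ nE, hneg _ _ hF, hneg _ _ hT, hneg _ _ hE]
          unfold altL midL stripSfx
          rw [if_neg hE, if_neg hF, if_neg hT, if_neg hG]
          simp [firstStripL]

-- one Python suffix-strip step equals stripSfx on the code points
lemma stripOne (s p : String) (k : Nat) (hk0 : 0 < k) (hlen : p.toList.length = k) :
    (if PySem.Str.endswith s p then PySem.Str.slice s none (some (-(k:Int))) else s).toList
      = stripSfx p.toList s.toList := by
  unfold stripSfx
  by_cases h : p.toList <:+ s.toList
  · rw [if_pos ((endswith_iff' s p).mpr h), if_pos h, slice_neg_toList s k hk0, hlen]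
  · rw [if_neg (fun hb => h ((endswith_iff' s p).mp hb)), if_neg h]

lemma stripMid (s : String) :
    (if PySem.Str.endswith s "_fake16" then PySem.Str.slice s none (some (-((7:Nat):Int)))
     else if PySem.Str.endswith s "_t16" then PySem.Str.slice s none (some (-((4:Nat):Int)))
     else s).toList = midL s.toList := by
  unfold midL
  have hfl : "_fake16".toList = fL := rfl
  by_cases hF : fL <:+ s.toList
  · rw [if_pos ((endswith_iff' s "_fake16").mpr (hfl ▸ hF)), if_pos hF,
        slice_neg_toList s 7 (by norm_num)]
    rfl
  · rw [if_neg (fun hb => hF (hfl ▸ (endswith_iff' s "_fake16").mp hb)), if_neg hF]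
    exact stripOne s "_t16" 4 (by norm_num) rfl

lemma alt_toList (s : String) : (normalize_llvm_symbol_alt s).toList = altL s.toList := by
  have c4 : (-4 : Int) = -((4:Nat):Int) := by norm_num
  have c7 : (-7 : Int) = -((7:Nat):Int) := by norm_num
  have c8 : (-8 : Int) = -((8:Nat):Int) := by norm_num
  simp only [normalize_llvm_symbol_alt, c4, c7, c8]
  rw [stripOne _ "_gfx1250" 8 (by norm_num) rfl, stripMid,
      stripOne s "_e64" 4 (by norm_num) rfl]
  rfl

lemma portA_toList (s : String) :
    (normalize_llvm_symbol s).toList = altL s.toList := by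
  rw [normalize_llvm_symbol, stripFirstA_toList _ _ (by decide), ← key s.toList]
  rfl

-- ===== VERDICT (by name: the statement is the Claim_ definition above) =====
theorem normalize_llvm_symbol_spec : Claim_equal_normalize_llvm_symbol := by
  intro s _
  unfold Spec_normalize_llvm_symbol
  exact String.toList_inj.mp ((portA_toList s).trans (alt_toList s).symm)
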